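-- pv_equiv track=rewrite | github.com/Oreobird/demo | ai/face_quality/gen_pb_model.py | split_dir_and_name
-- ===== SOURCE A (Python) =====
-- def split_dir_and_name(file_path):
--     tokens = file_path.split('/')
--     dir = ""
--     dir_tokens = tokens[:-1]
--     name = tokens[-1]
--     for token in dir_tokens:
--         dir += token + '/'
--     return dir, name
-- ===== SOURCE B (Python) =====
-- def split_dir_and_name(file_path):
--     idx = file_path.rfind('/')
--     return file_path[:idx + 1], file_path[idx + 1:]
-- ===== Notes on version B (the rewrite author's own statement) =====
-- stated objective: idiomatic
-- what changed: Replaces split('/') followed by a loop that rebuilds the directory prefix token by token with a single rfind('/') and two slices around that index.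
import Mathlib
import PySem

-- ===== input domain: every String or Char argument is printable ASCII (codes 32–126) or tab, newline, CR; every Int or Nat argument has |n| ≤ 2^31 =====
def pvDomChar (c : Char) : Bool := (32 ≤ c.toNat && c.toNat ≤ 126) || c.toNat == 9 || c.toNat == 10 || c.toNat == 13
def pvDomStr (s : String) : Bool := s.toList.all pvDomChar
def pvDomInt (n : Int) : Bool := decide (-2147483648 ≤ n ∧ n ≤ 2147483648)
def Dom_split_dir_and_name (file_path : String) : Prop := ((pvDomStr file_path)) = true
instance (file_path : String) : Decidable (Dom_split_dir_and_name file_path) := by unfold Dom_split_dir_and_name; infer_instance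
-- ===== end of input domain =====

-- B replaces split('/') + a token-rebuilding loop with one rfind('/') and two slices (same return value; idiomatic rewrite).


-- ===== PORT A =====
def split_dir_and_name (file_path : String) : String × String :=
  -- tokens = file_path.split('/')  ('/' is nonempty so split? is always `some`; getD [] is exact)
  let tokens : List String := (PySem.Str.split? file_path "/").getD []
  -- dir_tokens = tokens[:-1]
  let dir_tokens := PySem.List.slice tokens none (some (-1))
  -- name = tokens[-1]  (tokens is always nonempty, so pyGet? is always `some`; getD "" is exact)
  let name := (PySem.List.pyGet? tokens (-1)).getD ""
  -- for token in dir_tokens: dir += token + '/'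
  let dir := dir_tokens.foldl (fun d token => d ++ token ++ "/") ""
  (dir, name)

-- ===== PORT B =====
def split_dir_and_name_alt (file_path : String) : String × String :=
  let idx := PySem.Str.rfind file_path "/"
  (PySem.Str.slice file_path none (some (idx + 1)), PySem.Str.slice file_path (some (idx + 1)) none)

-- ===== PRECONDITION & SPEC =====
def Spec_split_dir_and_name (file_path : String) (out : String × String) : Prop := out = split_dir_and_name_alt file_path
instance (file_path : String) (out : String × String) : Decidable (Spec_split_dir_and_name file_path out) := by unfold Spec_split_dir_and_name; infer_instance

-- ===== CLAIM (what is proved, stated in full; the proofs are below) =====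
def Claim_equal_split_dir_and_name : Prop := ∀ (file_path : String), Dom_split_dir_and_name file_path → Spec_split_dir_and_name file_path (split_dir_and_name file_path)

-- ===== LEMMAS AND PROOFS =====

-- reference recursion for split('/') on the character level
def mySplit : List Char → List Char → List (List Char)
  | [], cur => [cur.reverse]
  | c :: rest, cur => if c = '/' then cur.reverse :: mySplit rest [] else mySplit rest (c :: cur)

theorem splitOn_go_eq (fuel : Nat) : ∀ (l cur : List Char) (acc : List (List Char)),
    l.length ≤ fuel → PySem.Chars.splitOn.go ['/'] fuel l cur acc = acc.reverse ++ mySplit l cur := by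
  induction fuel with
  | zero =>
    intro l cur acc h
    have : l = [] := List.eq_nil_of_length_eq_zero (Nat.le_zero.mp h)
    subst this
    simp [PySem.Chars.splitOn.go, mySplit]
  | succ n ih =>
    intro l cur acc h
    cases l with
    | nil => simp [PySem.Chars.splitOn.go, mySplit]
    | cons c rest =>
      simp only [PySem.Chars.splitOn.go]
      by_cases hc : c = '/'
      · subst hc
        have hpre : ['/'].isPrefixOf ('/' :: rest) = true := by simp [List.isPrefixOf]
        rw [if_pos hpre]
        simp only [List.length_cons] at h
        rw [ih _ _ _ (by simp; omega)]
        simp [mySplit]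
      · have hpre : ['/'].isPrefixOf (c :: rest) = false := by
          simp [List.isPrefixOf]
          exact fun hx => absurd hx.symm hc
        rw [if_neg (by simp [hpre])]
        simp only [List.length_cons] at h
        rw [ih _ _ _ (by omega)]
        simp [mySplit, hc]

theorem splitOn_eq (l : List Char) : PySem.Chars.splitOn l ['/'] = mySplit l [] := by
  show PySem.Chars.splitOn.go ['/'] (l.length + 1) l [] [] = _
  rw [splitOn_go_eq _ _ _ _ (by omega)]
  simp

theorem mySplit_no_slash : ∀ (l cur : List Char), '/' ∉ l → mySplit l cur = [cur.reverse ++ l] := by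
  intro l
  induction l with
  | nil => intro cur _; simp [mySplit]
  | cons c rest ih =>
    intro cur h
    simp only [List.mem_cons, not_or] at h
    simp [mySplit, Ne.symm h.1, ih _ h.2]

theorem mySplit_append (l₂ : List Char) (h2 : '/' ∉ l₂) :
    ∀ (l₁ cur : List Char), mySplit (l₁ ++ '/' :: l₂) cur = mySplit l₁ cur ++ [l₂] := by
  intro l₁
  induction l₁ with
  | nil => intro cur; simp [mySplit, mySplit_no_slash _ _ h2]
  | cons c rest ih =>
    intro cur
    by_cases hc : c = '/'
    · subst hc; simp [mySplit, ih]
    · simp [mySplit, hc, ih]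

theorem flatten_mySplit : ∀ (l cur : List Char),
    ((mySplit l cur).map (· ++ ['/'])).flatten = cur.reverse ++ l ++ ['/'] := by
  intro l
  induction l with
  | nil => intro cur; simp [mySplit]
  | cons c rest ih =>
    intro cur
    by_cases hc : c = '/'
    · subst hc; simp [mySplit, ih]
    · simp [mySplit, hc, ih]

theorem isPrefixOf_slash_false {xs : List Char} (h : '/' ∉ xs) : ['/'].isPrefixOf xs = false := by
  cases xs with
  | nil => rfl
  | cons a t =>
    simp only [List.mem_cons, not_or] at h
    simp [List.isPrefixOf]
    exact fun hx => h.1 hx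

theorem rfind_go_no_slash {l : List Char} (h : '/' ∉ l) :
    ∀ (j : Nat), PySem.Chars.rfind.go l ['/'] j = -1 := by
  intro j
  induction j with
  | zero => simp [PySem.Chars.rfind.go, isPrefixOf_slash_false h]
  | succ k ih =>
    have hd : '/' ∉ List.drop (k + 1) l := fun hx => h (List.mem_of_mem_drop hx)
    simp [PySem.Chars.rfind.go, isPrefixOf_slash_false hd, ih]

theorem rfind_go_slash (l₁ l₂ : List Char) (h2 : '/' ∉ l₂) :
    ∀ (j : Nat), l₁.length ≤ j → PySem.Chars.rfind.go (l₁ ++ '/' :: l₂) ['/'] j = (l₁.length : Int) := by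
  intro j
  induction j with
  | zero =>
    intro h
    have : l₁ = [] := List.eq_nil_of_length_eq_zero (Nat.le_zero.mp h)
    subst this
    simp [PySem.Chars.rfind.go, List.isPrefixOf]
  | succ k ih =>
    intro h
    rcases Nat.lt_or_ge k l₁.length with hk | hk
    · -- k + 1 = l₁.length : the slash is exactly at position k+1... here l₁.length = k+1
      have hlen : l₁.length = k + 1 := by omega
      have hdrop : List.drop (k + 1) (l₁ ++ '/' :: l₂) = '/' :: l₂ := by
        exact List.drop_left' hlen
      have hstep : PySem.Chars.rfind.go (l₁ ++ '/' :: l₂) ['/'] (k + 1) = ((k + 1 : Nat) : Int) := by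
        simp [PySem.Chars.rfind.go, hdrop, List.isPrefixOf]
      rw [hstep, hlen]
    · -- k + 1 > l₁.length : no slash at position k+1, recurse
      have hdrop : List.drop (k + 1) (l₁ ++ '/' :: l₂) = List.drop (k - l₁.length) l₂ := by
        rw [List.drop_append, List.drop_of_length_le (by omega : l₁.length ≤ k + 1)]
        have hstep : k + 1 - l₁.length = (k - l₁.length) + 1 := by omega
        simp [hstep]
      have hno : '/' ∉ List.drop (k - l₁.length) l₂ := fun hx => h2 (List.mem_of_mem_drop hx)
      simp [PySem.Chars.rfind.go, hdrop, isPrefixOf_slash_false hno, ih hk]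

theorem rfind_no_slash {l : List Char} (h : '/' ∉ l) : PySem.Chars.rfind l ['/'] = -1 :=
  rfind_go_no_slash h l.length

theorem rfind_slash (l₁ l₂ : List Char) (h2 : '/' ∉ l₂) :
    PySem.Chars.rfind (l₁ ++ '/' :: l₂) ['/'] = (l₁.length : Int) := by
  show PySem.Chars.rfind.go _ _ _ = _
  rw [rfind_go_slash l₁ l₂ h2 _ (by simp)]

theorem last_slash_decomp : ∀ (l : List Char), '/' ∈ l →
    ∃ l₁ l₂, l = l₁ ++ '/' :: l₂ ∧ '/' ∉ l₂ := by
  intro l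
  induction l with
  | nil => intro h; cases h
  | cons c rest ih =>
    intro _h
    by_cases hr : '/' ∈ rest
    · obtain ⟨l₁, l₂, heq, hno⟩ := ih hr
      exact ⟨c :: l₁, l₂, by simp [heq], hno⟩
    · have hc : c = '/' := by
        rcases List.mem_cons.mp _h with h | h
        · exact h.symm
        · exact absurd h hr
      exact ⟨[], rest, by simp [hc], hr⟩

theorem tokens_map_toList (s : String) :
    ((PySem.Str.split? s "/").getD []).map String.toList = PySem.Chars.splitOn s.toList ['/'] := by
  have h := PySem.Str.split?_map s "/"
  have hsep : ("/" : String).toList = ['/'] := rfl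
  rw [hsep] at h
  unfold PySem.Chars.split? at h
  simp only [List.isEmpty_cons] at h
  cases hx : PySem.Str.split? s "/" with
  | none => rw [hx] at h; simp at h
  | some ts => rw [hx] at h; simpa using h

theorem foldl_toList (ts : List String) : ∀ (a : String),
    (ts.foldl (fun d t => d ++ t ++ "/") a).toList
      = a.toList ++ (ts.map (fun t => t.toList ++ ['/'])).flatten := by
  induction ts with
  | nil => intro a; simp
  | cons t rest ih =>
    intro a
    simp only [List.foldl_cons, List.map_cons, List.flatten_cons, ih]
    simp

theorem pyGet_neg_one {α : Type} (xs : List α) : PySem.List.pyGet? xs (-1) = xs.getLast? := by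
  rcases xs with _ | ⟨a, t⟩
  · simp [PySem.List.pyGet?, PySem.List.pyIdx?]
  · simp [PySem.List.pyGet?, PySem.List.pyIdx?, List.getLast?_eq_getElem?]

-- ===== VERDICT (by name: the statement is the Claim_ definition above) =====
theorem split_dir_and_name_spec : Claim_equal_split_dir_and_name := by
  intro s _dom
  unfold Spec_split_dir_and_name split_dir_and_name split_dir_and_name_alt
  simp only []
  set l := s.toList with hl
  set tokens : List String := (PySem.Str.split? s "/").getD [] with htok
  have htl : tokens.map String.toList = mySplit l [] := by
    rw [htok, tokens_map_toList, splitOn_eq]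
  by_cases h : '/' ∈ l
  · obtain ⟨l₁, l₂, heq, hno⟩ := last_slash_decomp l h
    have hms : mySplit l [] = mySplit l₁ [] ++ [l₂] := by rw [heq, mySplit_append _ hno]
    -- rfind value
    have hrf : PySem.Str.rfind s "/" = (l₁.length : Int) := by
      rw [PySem.Str.rfind_eq]
      show PySem.Chars.rfind l ("/" : String).toList = _
      rw [show ("/" : String).toList = ['/'] from rfl, heq, rfind_slash _ _ hno]
    -- name
    have hmap : tokens.getLast?.map String.toList = some l₂ := by
      rw [← List.getLast?_map, htl, hms]; simp
    obtain ⟨t, ht1, ht2⟩ := Option.map_eq_some_iff.mp hmap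
    have hname : (PySem.List.pyGet? tokens (-1)).getD "" = t := by
      rw [pyGet_neg_one, ht1]; rfl
    -- dir
    have hdir :
        ((PySem.List.slice tokens none (some (-1))).foldl (fun d t => d ++ t ++ "/") "").toList
          = l₁ ++ ['/'] := by
      rw [PySem.List.slice_to_neg_one, foldl_toList]
      have : tokens.dropLast.map (fun t => t.toList ++ ['/'])
          = (tokens.map String.toList).dropLast.map (· ++ ['/']) := by
        rw [← List.map_dropLast]; simp [Function.comp_def]
      rw [this, htl, hms]
      simp only [List.dropLast_concat]
      rw [flatten_mySplit]
      simp
    -- B side slices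
    have hb1 : (PySem.Str.slice s none (some ((l₁.length : Int) + 1))).toList = l₁ ++ ['/'] := by
      rw [PySem.Str.toList_slice, PySem.Chars.slice_eq_listSlice]
      rw [PySem.List.slice_to _ (by omega)]
      have hnat : ((l₁.length : Int) + 1).toNat = l₁.length + 1 := by omega
      rw [hnat, ← hl, heq, List.take_append]
      simp
    have hb2 : (PySem.Str.slice s (some ((l₁.length : Int) + 1)) none).toList = l₂ := by
      rw [PySem.Str.toList_slice, PySem.Chars.slice_eq_listSlice]
      rw [PySem.List.slice_from _ (by omega)]
      have hnat : ((l₁.length : Int) + 1).toNat = l₁.length + 1 := by omega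
      rw [hnat, ← hl, heq, List.drop_append]
      simp
    rw [hrf]
    refine Prod.ext ?_ ?_
    · apply String.toList_inj.mp
      rw [hdir, hb1]
    · apply String.toList_inj.mp
      rw [hname, hb2, ht2]
  · -- no slash
    have hms : mySplit l [] = [l] := by rw [mySplit_no_slash _ _ h]; simp
    have hrf : PySem.Str.rfind s "/" = -1 := by
      rw [PySem.Str.rfind_eq]; exact rfind_no_slash h
    have htok1 : tokens = [s] := by
      have h1 : tokens.map String.toList = [l] := by rw [htl, hms]
      simp only [List.map_eq_singleton_iff] at h1
      obtain ⟨t, ht, ha⟩ := h1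
      rw [ht, String.toList_inj.mp (ha.trans hl)]
    rw [hrf, htok1]
    have h0 : (-1 : Int) + 1 = 0 := by omega
    rw [h0]
    refine Prod.ext ?_ ?_
    · apply String.toList_inj.mp
      rw [PySem.List.slice_to_neg_one]
      simp [PySem.Str.toList_slice, PySem.Chars.slice_eq_listSlice, PySem.List.slice_to _ (le_refl 0)]
    · apply String.toList_inj.mp
      rw [pyGet_neg_one]
      simp [PySem.Str.toList_slice, PySem.Chars.slice_eq_listSlice, PySem.List.slice_from _ (le_refl 0)]
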